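-- pv_equiv track=rewrite | github.com/blacktop/arm64-cgo | scripts/generate_cgo_wrappers.py | categorize_operations
-- ===== SOURCE A (Python) =====
-- def categorize_operations(operations):
--     """Categorize operations by type for better organization."""
--     categories = {
--         'Error': [],
--         'Arithmetic': [],
--         'Logical': [],
--         'Bitfield': [],
--         'Move': [],
--         'Memory': [],
--         'Branch': [],
--         'Conditional Branch': [],
--         'Compare and Branch': [],
--         'Conditional Select': [],
--         'System': [],
--         'Synchronization': [],
--         'PAC/Auth': [],
--         'Address': [],
--         'SIMD/FP': [],
--         'SVE': [],
--         'Crypto': [],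
--         'Other': []
--     }
--
--     for op in operations:
--         name = op.replace('ARM64_', '')
--
--         # Categorize based on instruction patterns
--         if op == 'ARM64_ERROR':
--             categories['Error'].append(op)
--         elif name.startswith('B_'):
--             categories['Conditional Branch'].append(op)
--         elif name in ['ADD', 'ADDS', 'SUB', 'SUBS', 'MUL', 'MADD', 'MSUB', 'SDIV', 'UDIV',
--                       'NEG', 'NEGS', 'ADC', 'ADCS', 'SBC', 'SBCS', 'MNEG', 'SMULL', 'UMULL',
--                       'SMLAL', 'UMLAL', 'SMULH', 'UMULH']:
--             categories['Arithmetic'].append(op)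
--         elif name in ['AND', 'ANDS', 'ORR', 'ORN', 'EOR', 'EON', 'BIC', 'BICS', 'TST', 'MVN']:
--             categories['Logical'].append(op)
--         elif name in ['BFM', 'SBFM', 'UBFM', 'BFI', 'BFXIL', 'SBFX', 'UBFX', 'SBFIZ', 'UBFIZ',
--                       'LSL', 'LSR', 'ASR', 'ROR', 'EXTR']:
--             categories['Bitfield'].append(op)
--         elif name.startswith('MOV') or name in ['MOVN', 'MOVK']:
--             categories['Move'].append(op)
--         elif any(name.startswith(prefix) for prefix in ['LD', 'ST', 'PRFM', 'LDAR', 'STLR',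
--                                                          'LDXR', 'STXR', 'LDAPR', 'LDADD']):
--             categories['Memory'].append(op)
--         elif name in ['B', 'BL', 'BR', 'BLR', 'RET', 'ERET', 'DRPS', 'BTI'] or \
--              name.startswith('RET') or name.startswith('ERET') or name.startswith('BLR') or \
--              name.startswith('BRA'):
--             categories['Branch'].append(op)
--         elif name in ['CBZ', 'CBNZ', 'TBZ', 'TBNZ']:
--             categories['Compare and Branch'].append(op)
--         elif name.startswith('CS') or name.startswith('CINC') or name.startswith('CINV') or \
--              name.startswith('CNEG') or name in ['CSEL', 'CSET', 'CSETM']: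
--             categories['Conditional Select'].append(op)
--         elif name in ['MRS', 'MSR', 'NOP', 'HINT', 'HLT', 'BRK', 'SVC', 'HVC', 'SMC',
--                       'SYS', 'SYSL', 'IC', 'DC', 'AT', 'TLBI', 'SB']:
--             categories['System'].append(op)
--         elif name in ['ISB', 'DSB', 'DMB', 'YIELD', 'WFE', 'WFI', 'SEV', 'SEVL', 'CLREX']:
--             categories['Synchronization'].append(op)
--         elif any(name.startswith(prefix) for prefix in ['PAC', 'AUT', 'XPAC']) or \
--              any(name.endswith(suffix) for suffix in ['AA', 'AB', 'AZ', 'BZ']):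
--             categories['PAC/Auth'].append(op)
--         elif name in ['ADR', 'ADRP']:
--             categories['Address'].append(op)
--         elif any(name.startswith(prefix) for prefix in ['FADD', 'FSUB', 'FMUL', 'FDIV', 'FABS',
--                                                          'FNEG', 'FSQRT', 'FCMP', 'FCVT', 'FMOV',
--                                                          'SCVTF', 'UCVTF', 'FCVTZ', 'FRINT']):
--             categories['SIMD/FP'].append(op)
--         elif name.startswith('Z') or any(name.startswith(prefix) for prefix in ['ADDVL', 'ADDPL',
--                                                                                  'RDVL', 'RDPL']):
--             categories['SVE'].append(op)
--         elif any(name.startswith(prefix) for prefix in ['AES', 'SHA', 'SM3', 'SM4']):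
--             categories['Crypto'].append(op)
--         else:
--             categories['Other'].append(op)
--
--     # Remove empty categories
--     return {k: v for k, v in categories.items() if v}
-- ===== SOURCE B (Python) =====
-- # B: a table-driven interpreter: one flat ordered list of (kind, pattern, category-index)
-- # rules is scanned for the first match per op, then results are grouped category-major.
--
-- _CATS = ['Error', 'Arithmetic', 'Logical', 'Bitfield', 'Move', 'Memory', 'Branch',
--          'Conditional Branch', 'Compare and Branch', 'Conditional Select', 'System',
--          'Synchronization', 'PAC/Auth', 'Address', 'SIMD/FP', 'SVE', 'Crypto', 'Other']
--
-- # kind: 0 = whole op equals pattern, 1 = stripped name equals pattern,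
-- # 2 = name startswith pattern, 3 = name endswith pattern.
-- # First matching rule wins; no match -> 17 ('Other').
-- _RULES = [
--     (0, 'ARM64_ERROR', 0), (2, 'B_', 7), (1, 'ADD', 1), (1, 'ADDS', 1), (1, 'SUB', 1),
--     (1, 'SUBS', 1), (1, 'MUL', 1), (1, 'MADD', 1), (1, 'MSUB', 1), (1, 'SDIV', 1),
--     (1, 'UDIV', 1), (1, 'NEG', 1), (1, 'NEGS', 1), (1, 'ADC', 1), (1, 'ADCS', 1),
--     (1, 'SBC', 1), (1, 'SBCS', 1), (1, 'MNEG', 1), (1, 'SMULL', 1), (1, 'UMULL', 1),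
--     (1, 'SMLAL', 1), (1, 'UMLAL', 1), (1, 'SMULH', 1), (1, 'UMULH', 1), (1, 'AND', 2),
--     (1, 'ANDS', 2), (1, 'ORR', 2), (1, 'ORN', 2), (1, 'EOR', 2), (1, 'EON', 2), (1, 'BIC', 2),
--     (1, 'BICS', 2), (1, 'TST', 2), (1, 'MVN', 2), (1, 'BFM', 3), (1, 'SBFM', 3),
--     (1, 'UBFM', 3), (1, 'BFI', 3), (1, 'BFXIL', 3), (1, 'SBFX', 3), (1, 'UBFX', 3),
--     (1, 'SBFIZ', 3), (1, 'UBFIZ', 3), (1, 'LSL', 3), (1, 'LSR', 3), (1, 'ASR', 3),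
--     (1, 'ROR', 3), (1, 'EXTR', 3), (2, 'MOV', 4), (1, 'MOVN', 4), (1, 'MOVK', 4),
--     (2, 'LD', 5), (2, 'ST', 5), (2, 'PRFM', 5), (2, 'LDAR', 5), (2, 'STLR', 5),
--     (2, 'LDXR', 5), (2, 'STXR', 5), (2, 'LDAPR', 5), (2, 'LDADD', 5), (1, 'B', 6),
--     (1, 'BL', 6), (1, 'BR', 6), (1, 'BLR', 6), (1, 'RET', 6), (1, 'ERET', 6), (1, 'DRPS', 6),
--     (1, 'BTI', 6), (2, 'RET', 6), (2, 'ERET', 6), (2, 'BLR', 6), (2, 'BRA', 6), (1, 'CBZ', 8),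
--     (1, 'CBNZ', 8), (1, 'TBZ', 8), (1, 'TBNZ', 8), (2, 'CS', 9), (2, 'CINC', 9),
--     (2, 'CINV', 9), (2, 'CNEG', 9), (1, 'CSEL', 9), (1, 'CSET', 9), (1, 'CSETM', 9),
--     (1, 'MRS', 10), (1, 'MSR', 10), (1, 'NOP', 10), (1, 'HINT', 10), (1, 'HLT', 10),
--     (1, 'BRK', 10), (1, 'SVC', 10), (1, 'HVC', 10), (1, 'SMC', 10), (1, 'SYS', 10),
--     (1, 'SYSL', 10), (1, 'IC', 10), (1, 'DC', 10), (1, 'AT', 10), (1, 'TLBI', 10),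
--     (1, 'SB', 10), (1, 'ISB', 11), (1, 'DSB', 11), (1, 'DMB', 11), (1, 'YIELD', 11),
--     (1, 'WFE', 11), (1, 'WFI', 11), (1, 'SEV', 11), (1, 'SEVL', 11), (1, 'CLREX', 11),
--     (2, 'PAC', 12), (2, 'AUT', 12), (2, 'XPAC', 12), (3, 'AA', 12), (3, 'AB', 12),
--     (3, 'AZ', 12), (3, 'BZ', 12), (1, 'ADR', 13), (1, 'ADRP', 13), (2, 'FADD', 14),
--     (2, 'FSUB', 14), (2, 'FMUL', 14), (2, 'FDIV', 14), (2, 'FABS', 14), (2, 'FNEG', 14),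
--     (2, 'FSQRT', 14), (2, 'FCMP', 14), (2, 'FCVT', 14), (2, 'FMOV', 14), (2, 'SCVTF', 14),
--     (2, 'UCVTF', 14), (2, 'FCVTZ', 14), (2, 'FRINT', 14), (2, 'Z', 15), (2, 'ADDVL', 15),
--     (2, 'ADDPL', 15), (2, 'RDVL', 15), (2, 'RDPL', 15), (2, 'AES', 16), (2, 'SHA', 16),
--     (2, 'SM3', 16), (2, 'SM4', 16)]
--
--
-- def _rule_index(op):
--     name = op.replace('ARM64_', '')
--     for kind, pat, idx in _RULES:
--         if kind == 0:
--             hit = op == pat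
--         elif kind == 1:
--             hit = name == pat
--         elif kind == 2:
--             hit = name.startswith(pat)
--         else:
--             hit = name.endswith(pat)
--         if hit:
--             return idx
--     return 17
--
--
-- def categorize_operations(operations):
--     """Categorize operations by type for better organization."""
--     labels = [_rule_index(op) for op in operations]
--     out = {}
--     for i, cat in enumerate(_CATS):
--         ops = [op for op, j in zip(operations, labels) if j == i]
--         if ops:
--             out[cat] = ops
--     return out
-- ===== Notes on version B (the rewrite author's own statement) =====
-- stated objective: alternative
-- what changed: A's hard-coded 18-branch elif chain appending into a pre-initialized dict of category lists is replaced by a table-driven interpreter: one flat ordered list of (kind, pattern, category-index) rules scanned for the first match per op, then the output built category-major by grouping ops by their rule index.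
import Mathlib
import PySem

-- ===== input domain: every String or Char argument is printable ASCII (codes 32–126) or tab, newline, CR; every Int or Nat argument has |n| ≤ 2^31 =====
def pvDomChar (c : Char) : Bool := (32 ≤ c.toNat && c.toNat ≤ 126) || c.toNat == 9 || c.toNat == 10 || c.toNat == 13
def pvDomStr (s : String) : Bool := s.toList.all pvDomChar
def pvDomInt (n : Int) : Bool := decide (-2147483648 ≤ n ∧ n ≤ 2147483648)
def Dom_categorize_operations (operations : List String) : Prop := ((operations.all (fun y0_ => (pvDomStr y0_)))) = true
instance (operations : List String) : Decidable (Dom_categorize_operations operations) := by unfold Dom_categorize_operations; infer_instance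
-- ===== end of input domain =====

-- B replaces A's hard-coded 18-branch elif chain (appending into a pre-initialized dict of
-- category lists) by a table-driven interpreter: one flat ordered (kind, pattern, index) rule
-- list scanned for the first match per op, then grouping ops category-major by rule index
-- (objective: alternative).

-- ===== PORT A =====
-- A's loop body (the big elif chain), as a named step function used by the fold.
def pvStepA (categories : PySem.Dict String (List String)) (op : String) :
    PySem.Dict String (List String) :=
  let name := PySem.Str.replace op "ARM64_" ""
  if op == "ARM64_ERROR" then categories.modify "Error" [] (· ++ [op])
  else if PySem.Str.startswith name "B_" then categories.modify "Conditional Branch" [] (· ++ [op])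
  else if (["ADD", "ADDS", "SUB", "SUBS", "MUL", "MADD", "MSUB", "SDIV", "UDIV",
            "NEG", "NEGS", "ADC", "ADCS", "SBC", "SBCS", "MNEG", "SMULL", "UMULL",
            "SMLAL", "UMLAL", "SMULH", "UMULH"] : List String).contains name then
    categories.modify "Arithmetic" [] (· ++ [op])
  else if (["AND", "ANDS", "ORR", "ORN", "EOR", "EON", "BIC", "BICS", "TST", "MVN"] : List String).contains name then
    categories.modify "Logical" [] (· ++ [op])
  else if (["BFM", "SBFM", "UBFM", "BFI", "BFXIL", "SBFX", "UBFX", "SBFIZ", "UBFIZ",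
            "LSL", "LSR", "ASR", "ROR", "EXTR"] : List String).contains name then
    categories.modify "Bitfield" [] (· ++ [op])
  else if PySem.Str.startswith name "MOV" || (["MOVN", "MOVK"] : List String).contains name then
    categories.modify "Move" [] (· ++ [op])
  else if (["LD", "ST", "PRFM", "LDAR", "STLR", "LDXR", "STXR", "LDAPR", "LDADD"] : List String).any
      (fun p => PySem.Str.startswith name p) then
    categories.modify "Memory" [] (· ++ [op])
  else if (["B", "BL", "BR", "BLR", "RET", "ERET", "DRPS", "BTI"] : List String).contains name ||
      PySem.Str.startswith name "RET" || PySem.Str.startswith name "ERET" ||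
      PySem.Str.startswith name "BLR" || PySem.Str.startswith name "BRA" then
    categories.modify "Branch" [] (· ++ [op])
  else if (["CBZ", "CBNZ", "TBZ", "TBNZ"] : List String).contains name then
    categories.modify "Compare and Branch" [] (· ++ [op])
  else if PySem.Str.startswith name "CS" || PySem.Str.startswith name "CINC" ||
      PySem.Str.startswith name "CINV" || PySem.Str.startswith name "CNEG" ||
      (["CSEL", "CSET", "CSETM"] : List String).contains name then
    categories.modify "Conditional Select" [] (· ++ [op])
  else if (["MRS", "MSR", "NOP", "HINT", "HLT", "BRK", "SVC", "HVC", "SMC",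
            "SYS", "SYSL", "IC", "DC", "AT", "TLBI", "SB"] : List String).contains name then
    categories.modify "System" [] (· ++ [op])
  else if (["ISB", "DSB", "DMB", "YIELD", "WFE", "WFI", "SEV", "SEVL", "CLREX"] : List String).contains name then
    categories.modify "Synchronization" [] (· ++ [op])
  else if (["PAC", "AUT", "XPAC"] : List String).any (fun p => PySem.Str.startswith name p) ||
      (["AA", "AB", "AZ", "BZ"] : List String).any (fun s => PySem.Str.endswith name s) then
    categories.modify "PAC/Auth" [] (· ++ [op])
  else if (["ADR", "ADRP"] : List String).contains name then
    categories.modify "Address" [] (· ++ [op])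
  else if (["FADD", "FSUB", "FMUL", "FDIV", "FABS", "FNEG", "FSQRT", "FCMP", "FCVT",
            "FMOV", "SCVTF", "UCVTF", "FCVTZ", "FRINT"] : List String).any
      (fun p => PySem.Str.startswith name p) then
    categories.modify "SIMD/FP" [] (· ++ [op])
  else if PySem.Str.startswith name "Z" ||
      (["ADDVL", "ADDPL", "RDVL", "RDPL"] : List String).any
        (fun p => PySem.Str.startswith name p) then
    categories.modify "SVE" [] (· ++ [op])
  else if (["AES", "SHA", "SM3", "SM4"] : List String).any
      (fun p => PySem.Str.startswith name p) then
    categories.modify "Crypto" [] (· ++ [op])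
  else categories.modify "Other" [] (· ++ [op])

def categorize_operations (operations : List String) : List (String × List String) :=
  let categories : PySem.Dict String (List String) := PySem.Dict.ofList
    [("Error", []), ("Arithmetic", []), ("Logical", []), ("Bitfield", []), ("Move", []),
     ("Memory", []), ("Branch", []), ("Conditional Branch", []), ("Compare and Branch", []),
     ("Conditional Select", []), ("System", []), ("Synchronization", []), ("PAC/Auth", []),
     ("Address", []), ("SIMD/FP", []), ("SVE", []), ("Crypto", []), ("Other", [])]
  let categories := operations.foldl pvStepA categories
  -- {k: v for k, v in categories.items() if v}
  categories.items.filter (fun kv => !kv.2.isEmpty)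

-- ===== PORT B =====
-- _CATS
def pvCats : List String :=
  ["Error", "Arithmetic", "Logical", "Bitfield", "Move", "Memory", "Branch",
   "Conditional Branch", "Compare and Branch", "Conditional Select", "System",
   "Synchronization", "PAC/Auth", "Address", "SIMD/FP", "SVE", "Crypto", "Other"]

-- _RULES: kind 0 = whole op equals, 1 = stripped name equals, 2 = startswith, 3 = endswith.
def pvRulesB : List (Nat × String × Int) :=
  [(0, "ARM64_ERROR", 0), (2, "B_", 7), (1, "ADD", 1), (1, "ADDS", 1), (1, "SUB", 1),
   (1, "SUBS", 1), (1, "MUL", 1), (1, "MADD", 1), (1, "MSUB", 1), (1, "SDIV", 1), (1, "UDIV", 1),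
   (1, "NEG", 1), (1, "NEGS", 1), (1, "ADC", 1), (1, "ADCS", 1), (1, "SBC", 1), (1, "SBCS", 1),
   (1, "MNEG", 1), (1, "SMULL", 1), (1, "UMULL", 1), (1, "SMLAL", 1), (1, "UMLAL", 1),
   (1, "SMULH", 1), (1, "UMULH", 1), (1, "AND", 2), (1, "ANDS", 2), (1, "ORR", 2), (1, "ORN", 2),
   (1, "EOR", 2), (1, "EON", 2), (1, "BIC", 2), (1, "BICS", 2), (1, "TST", 2), (1, "MVN", 2),
   (1, "BFM", 3), (1, "SBFM", 3), (1, "UBFM", 3), (1, "BFI", 3), (1, "BFXIL", 3), (1, "SBFX", 3),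
   (1, "UBFX", 3), (1, "SBFIZ", 3), (1, "UBFIZ", 3), (1, "LSL", 3), (1, "LSR", 3), (1, "ASR", 3),
   (1, "ROR", 3), (1, "EXTR", 3), (2, "MOV", 4), (1, "MOVN", 4), (1, "MOVK", 4), (2, "LD", 5),
   (2, "ST", 5), (2, "PRFM", 5), (2, "LDAR", 5), (2, "STLR", 5), (2, "LDXR", 5), (2, "STXR", 5),
   (2, "LDAPR", 5), (2, "LDADD", 5), (1, "B", 6), (1, "BL", 6), (1, "BR", 6), (1, "BLR", 6),
   (1, "RET", 6), (1, "ERET", 6), (1, "DRPS", 6), (1, "BTI", 6), (2, "RET", 6), (2, "ERET", 6),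
   (2, "BLR", 6), (2, "BRA", 6), (1, "CBZ", 8), (1, "CBNZ", 8), (1, "TBZ", 8), (1, "TBNZ", 8),
   (2, "CS", 9), (2, "CINC", 9), (2, "CINV", 9), (2, "CNEG", 9), (1, "CSEL", 9), (1, "CSET", 9),
   (1, "CSETM", 9), (1, "MRS", 10), (1, "MSR", 10), (1, "NOP", 10), (1, "HINT", 10),
   (1, "HLT", 10), (1, "BRK", 10), (1, "SVC", 10), (1, "HVC", 10), (1, "SMC", 10),
   (1, "SYS", 10), (1, "SYSL", 10), (1, "IC", 10), (1, "DC", 10), (1, "AT", 10), (1, "TLBI", 10),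
   (1, "SB", 10), (1, "ISB", 11), (1, "DSB", 11), (1, "DMB", 11), (1, "YIELD", 11),
   (1, "WFE", 11), (1, "WFI", 11), (1, "SEV", 11), (1, "SEVL", 11), (1, "CLREX", 11),
   (2, "PAC", 12), (2, "AUT", 12), (2, "XPAC", 12), (3, "AA", 12), (3, "AB", 12), (3, "AZ", 12),
   (3, "BZ", 12), (1, "ADR", 13), (1, "ADRP", 13), (2, "FADD", 14), (2, "FSUB", 14),
   (2, "FMUL", 14), (2, "FDIV", 14), (2, "FABS", 14), (2, "FNEG", 14), (2, "FSQRT", 14),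
   (2, "FCMP", 14), (2, "FCVT", 14), (2, "FMOV", 14), (2, "SCVTF", 14), (2, "UCVTF", 14),
   (2, "FCVTZ", 14), (2, "FRINT", 14), (2, "Z", 15), (2, "ADDVL", 15), (2, "ADDPL", 15),
   (2, "RDVL", 15), (2, "RDPL", 15), (2, "AES", 16), (2, "SHA", 16), (2, "SM3", 16),
   (2, "SM4", 16)]

-- the per-rule test (the if/elif computing 'hit' in _rule_index's loop body)
def pvHit (op name : String) (r : Nat × String × Int) : Bool :=
  match r with
  | (0, pat, _) => op == pat
  | (1, pat, _) => name == pat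
  | (2, pat, _) => PySem.Str.startswith name pat
  | (_, pat, _) => PySem.Str.endswith name pat

-- the 'for kind, pat, idx in _RULES: … return idx' loop, fallthrough 17
def pvScanB (op name : String) : List (Nat × String × Int) → Int
  | [] => 17
  | r :: rs => if pvHit op name r then r.2.2 else pvScanB op name rs

-- _rule_index(op)
def pvRuleIndex (op : String) : Int :=
  let name := PySem.Str.replace op "ARM64_" ""
  pvScanB op name pvRulesB

def categorize_operations_alt (operations : List String) : List (String × List String) :=
  let labels := operations.map pvRuleIndex
  (PySem.List.enumerate pvCats).foldl
    (fun out p =>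
      let ops := ((operations.zip labels).filter (fun q => q.2 == p.1)).map Prod.fst
      if !ops.isEmpty then out ++ [(p.2, ops)] else out)
    []

-- ===== PRECONDITION & SPEC =====
def Spec_categorize_operations (operations : List String) (out : List (String × List String)) : Prop := out = categorize_operations_alt operations
instance (operations : List String) (out : List (String × List String)) : Decidable (Spec_categorize_operations operations out) := by unfold Spec_categorize_operations; infer_instance

-- ===== CLAIM (what is proved, stated in full; the proofs are below) =====
def Claim_equal_categorize_operations : Prop := ∀ (operations : List String), Dom_categorize_operations operations → Spec_categorize_operations operations (categorize_operations operations)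

-- ===== LEMMAS AND PROOFS =====

-- Proof-side view of A's elif chain as data: (condition, category name, category index).
def pvChainA (d : PySem.Dict String (List String)) (op : String) :
    List (Bool × String × Int) → PySem.Dict String (List String)
  | [] => d.modify "Other" [] (· ++ [op])
  | (b, c, _) :: rs => if b then d.modify c [] (· ++ [op]) else pvChainA d op rs

def pvChainC : List (Bool × String × Int) → String
  | [] => "Other"
  | (b, c, _) :: rs => if b then c else pvChainC rs

def pvChainI : List (Bool × String × Int) → Int
  | [] => 17
  | (b, _, i) :: rs => if b then i else pvChainI rs

-- A's conditions 2..17 (those that depend only on name), in order, as data.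
def pvCondTail (name : String) : List (Bool × String × Int) :=
  [(PySem.Str.startswith name "B_", "Conditional Branch", 7),
   ((["ADD", "ADDS", "SUB", "SUBS", "MUL", "MADD", "MSUB", "SDIV", "UDIV",
      "NEG", "NEGS", "ADC", "ADCS", "SBC", "SBCS", "MNEG", "SMULL", "UMULL",
      "SMLAL", "UMLAL", "SMULH", "UMULH"] : List String).contains name, "Arithmetic", 1),
   ((["AND", "ANDS", "ORR", "ORN", "EOR", "EON", "BIC", "BICS", "TST", "MVN"] : List String).contains name, "Logical", 2),
   ((["BFM", "SBFM", "UBFM", "BFI", "BFXIL", "SBFX", "UBFX", "SBFIZ", "UBFIZ",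
      "LSL", "LSR", "ASR", "ROR", "EXTR"] : List String).contains name, "Bitfield", 3),
   (PySem.Str.startswith name "MOV" || (["MOVN", "MOVK"] : List String).contains name, "Move", 4),
   ((["LD", "ST", "PRFM", "LDAR", "STLR", "LDXR", "STXR", "LDAPR", "LDADD"] : List String).any
      (fun p => PySem.Str.startswith name p), "Memory", 5),
   ((["B", "BL", "BR", "BLR", "RET", "ERET", "DRPS", "BTI"] : List String).contains name ||
      PySem.Str.startswith name "RET" || PySem.Str.startswith name "ERET" ||
      PySem.Str.startswith name "BLR" || PySem.Str.startswith name "BRA", "Branch", 6),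
   ((["CBZ", "CBNZ", "TBZ", "TBNZ"] : List String).contains name, "Compare and Branch", 8),
   (PySem.Str.startswith name "CS" || PySem.Str.startswith name "CINC" ||
      PySem.Str.startswith name "CINV" || PySem.Str.startswith name "CNEG" ||
      (["CSEL", "CSET", "CSETM"] : List String).contains name, "Conditional Select", 9),
   ((["MRS", "MSR", "NOP", "HINT", "HLT", "BRK", "SVC", "HVC", "SMC",
      "SYS", "SYSL", "IC", "DC", "AT", "TLBI", "SB"] : List String).contains name, "System", 10),
   ((["ISB", "DSB", "DMB", "YIELD", "WFE", "WFI", "SEV", "SEVL", "CLREX"] : List String).contains name, "Synchronization", 11),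
   ((["PAC", "AUT", "XPAC"] : List String).any (fun p => PySem.Str.startswith name p) ||
      (["AA", "AB", "AZ", "BZ"] : List String).any (fun s => PySem.Str.endswith name s), "PAC/Auth", 12),
   ((["ADR", "ADRP"] : List String).contains name, "Address", 13),
   ((["FADD", "FSUB", "FMUL", "FDIV", "FABS", "FNEG", "FSQRT", "FCMP", "FCVT",
      "FMOV", "SCVTF", "UCVTF", "FCVTZ", "FRINT"] : List String).any
      (fun p => PySem.Str.startswith name p), "SIMD/FP", 14),
   (PySem.Str.startswith name "Z" ||
      (["ADDVL", "ADDPL", "RDVL", "RDPL"] : List String).any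
        (fun p => PySem.Str.startswith name p), "SVE", 15),
   ((["AES", "SHA", "SM3", "SM4"] : List String).any
      (fun p => PySem.Str.startswith name p), "Crypto", 16)]

-- A's 17 conditions (before the final 'Other'), in order, as data.
def pvConds (op : String) : List (Bool × String × Int) :=
  (op == "ARM64_ERROR", "Error", 0) :: pvCondTail (PySem.Str.replace op "ARM64_" "")

-- A's classifier, read off from its elif chain.
def pvClassifyA (op : String) : String := pvChainC (pvConds op)

lemma pvChainA_eq_modify (d : PySem.Dict String (List String)) (op : String) :
    ∀ rs : List (Bool × String × Int),
      pvChainA d op rs = d.modify (pvChainC rs) [] (· ++ [op]) := by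
  intro rs
  induction rs with
  | nil => rfl
  | cons p rs ih =>
      obtain ⟨b, c, i⟩ := p
      by_cases h : b = true <;> simp [pvChainA, pvChainC, h, ih]

lemma pvStepA_eq_modify (d : PySem.Dict String (List String)) (op : String) :
    pvStepA d op = d.modify (pvClassifyA op) [] (· ++ [op]) := by
  have h := pvChainA_eq_modify d op (pvConds op)
  exact h

-- the segments of pvRulesB, one per elif branch of A
def pvSeg0 : List (Nat × String × Int) :=
  [(0, "ARM64_ERROR", 0)]

def pvSeg1 : List (Nat × String × Int) :=
  [(2, "B_", 7)]

def pvSeg2 : List (Nat × String × Int) :=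
  [(1, "ADD", 1), (1, "ADDS", 1), (1, "SUB", 1), (1, "SUBS", 1), (1, "MUL", 1), (1, "MADD", 1),
   (1, "MSUB", 1), (1, "SDIV", 1), (1, "UDIV", 1), (1, "NEG", 1), (1, "NEGS", 1), (1, "ADC", 1),
   (1, "ADCS", 1), (1, "SBC", 1), (1, "SBCS", 1), (1, "MNEG", 1), (1, "SMULL", 1),
   (1, "UMULL", 1), (1, "SMLAL", 1), (1, "UMLAL", 1), (1, "SMULH", 1), (1, "UMULH", 1)]

def pvSeg3 : List (Nat × String × Int) :=
  [(1, "AND", 2), (1, "ANDS", 2), (1, "ORR", 2), (1, "ORN", 2), (1, "EOR", 2), (1, "EON", 2),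
   (1, "BIC", 2), (1, "BICS", 2), (1, "TST", 2), (1, "MVN", 2)]

def pvSeg4 : List (Nat × String × Int) :=
  [(1, "BFM", 3), (1, "SBFM", 3), (1, "UBFM", 3), (1, "BFI", 3), (1, "BFXIL", 3), (1, "SBFX", 3),
   (1, "UBFX", 3), (1, "SBFIZ", 3), (1, "UBFIZ", 3), (1, "LSL", 3), (1, "LSR", 3), (1, "ASR", 3),
   (1, "ROR", 3), (1, "EXTR", 3)]

def pvSeg5 : List (Nat × String × Int) :=
  [(2, "MOV", 4), (1, "MOVN", 4), (1, "MOVK", 4)]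

def pvSeg6 : List (Nat × String × Int) :=
  [(2, "LD", 5), (2, "ST", 5), (2, "PRFM", 5), (2, "LDAR", 5), (2, "STLR", 5), (2, "LDXR", 5),
   (2, "STXR", 5), (2, "LDAPR", 5), (2, "LDADD", 5)]

def pvSeg7 : List (Nat × String × Int) :=
  [(1, "B", 6), (1, "BL", 6), (1, "BR", 6), (1, "BLR", 6), (1, "RET", 6), (1, "ERET", 6),
   (1, "DRPS", 6), (1, "BTI", 6), (2, "RET", 6), (2, "ERET", 6), (2, "BLR", 6), (2, "BRA", 6)]

def pvSeg8 : List (Nat × String × Int) :=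
  [(1, "CBZ", 8), (1, "CBNZ", 8), (1, "TBZ", 8), (1, "TBNZ", 8)]

def pvSeg9 : List (Nat × String × Int) :=
  [(2, "CS", 9), (2, "CINC", 9), (2, "CINV", 9), (2, "CNEG", 9), (1, "CSEL", 9), (1, "CSET", 9),
   (1, "CSETM", 9)]

def pvSeg10 : List (Nat × String × Int) :=
  [(1, "MRS", 10), (1, "MSR", 10), (1, "NOP", 10), (1, "HINT", 10), (1, "HLT", 10),
   (1, "BRK", 10), (1, "SVC", 10), (1, "HVC", 10), (1, "SMC", 10), (1, "SYS", 10),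
   (1, "SYSL", 10), (1, "IC", 10), (1, "DC", 10), (1, "AT", 10), (1, "TLBI", 10), (1, "SB", 10)]

def pvSeg11 : List (Nat × String × Int) :=
  [(1, "ISB", 11), (1, "DSB", 11), (1, "DMB", 11), (1, "YIELD", 11), (1, "WFE", 11),
   (1, "WFI", 11), (1, "SEV", 11), (1, "SEVL", 11), (1, "CLREX", 11)]

def pvSeg12 : List (Nat × String × Int) :=
  [(2, "PAC", 12), (2, "AUT", 12), (2, "XPAC", 12), (3, "AA", 12), (3, "AB", 12), (3, "AZ", 12),
   (3, "BZ", 12)]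

def pvSeg13 : List (Nat × String × Int) :=
  [(1, "ADR", 13), (1, "ADRP", 13)]

def pvSeg14 : List (Nat × String × Int) :=
  [(2, "FADD", 14), (2, "FSUB", 14), (2, "FMUL", 14), (2, "FDIV", 14), (2, "FABS", 14),
   (2, "FNEG", 14), (2, "FSQRT", 14), (2, "FCMP", 14), (2, "FCVT", 14), (2, "FMOV", 14),
   (2, "SCVTF", 14), (2, "UCVTF", 14), (2, "FCVTZ", 14), (2, "FRINT", 14)]

def pvSeg15 : List (Nat × String × Int) :=
  [(2, "Z", 15), (2, "ADDVL", 15), (2, "ADDPL", 15), (2, "RDVL", 15), (2, "RDPL", 15)]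

def pvSeg16 : List (Nat × String × Int) :=
  [(2, "AES", 16), (2, "SHA", 16), (2, "SM3", 16), (2, "SM4", 16)]

lemma pvRulesB_split :
    pvRulesB = pvSeg0 ++ (pvSeg1 ++ (pvSeg2 ++ (pvSeg3 ++ (pvSeg4 ++ (pvSeg5 ++ (pvSeg6 ++
      (pvSeg7 ++ (pvSeg8 ++ (pvSeg9 ++ (pvSeg10 ++ (pvSeg11 ++ (pvSeg12 ++ (pvSeg13 ++
      (pvSeg14 ++ (pvSeg15 ++ (pvSeg16 ++ [])))))))))))))))) := by rfl

-- scanning a segment whose rules all carry the same index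
lemma pvScanB_step (op name : String) (S rest : List (Nat × String × Int)) (i : Int)
    (h : ∀ r ∈ S, r.2.2 = i) :
    pvScanB op name (S ++ rest) =
      if S.any (pvHit op name) then i else pvScanB op name rest := by
  induction S with
  | nil => simp
  | cons r S ih =>
      by_cases hh : pvHit op name r = true
      · simp [pvScanB, hh, h r (List.mem_cons_self)]
      · simp only [List.cons_append, pvScanB, hh, Bool.false_eq_true, if_false,
          List.any_cons, Bool.false_or]
        exact ih (fun r hr => h r (List.mem_cons_of_mem _ hr))

-- B's rule scan computes exactly A's elif chain, as an index
lemma pvScan_eq_chainTail (op name : String) :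
    pvScanB op name pvRulesB =
      pvChainI ((op == "ARM64_ERROR", "Error", (0 : Int)) :: pvCondTail name) := by
  rw [pvRulesB_split,
    pvScanB_step op name pvSeg0 _ 0 (by decide),
    pvScanB_step op name pvSeg1 _ 7 (by decide),
    pvScanB_step op name pvSeg2 _ 1 (by decide),
    pvScanB_step op name pvSeg3 _ 2 (by decide),
    pvScanB_step op name pvSeg4 _ 3 (by decide),
    pvScanB_step op name pvSeg5 _ 4 (by decide),
    pvScanB_step op name pvSeg6 _ 5 (by decide),
    pvScanB_step op name pvSeg7 _ 6 (by decide),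
    pvScanB_step op name pvSeg8 _ 8 (by decide),
    pvScanB_step op name pvSeg9 _ 9 (by decide),
    pvScanB_step op name pvSeg10 _ 10 (by decide),
    pvScanB_step op name pvSeg11 _ 11 (by decide),
    pvScanB_step op name pvSeg12 _ 12 (by decide),
    pvScanB_step op name pvSeg13 _ 13 (by decide),
    pvScanB_step op name pvSeg14 _ 14 (by decide),
    pvScanB_step op name pvSeg15 _ 15 (by decide),
    pvScanB_step op name pvSeg16 _ 16 (by decide)]
  simp only [pvSeg0, pvSeg1, pvSeg2, pvSeg3, pvSeg4, pvSeg5, pvSeg6, pvSeg7, pvSeg8,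
    pvSeg9, pvSeg10, pvSeg11, pvSeg12, pvSeg13, pvSeg14, pvSeg15, pvSeg16,
    pvHit, pvScanB, pvChainI, pvCondTail, List.any_cons, List.any_nil,
    List.contains_cons, List.contains_nil, Bool.or_false, Bool.or_assoc]

lemma pvScan_eq_chainI (op : String) : pvRuleIndex op = pvChainI (pvConds op) := by
  unfold pvRuleIndex pvConds
  exact pvScan_eq_chainTail op _

-- reading the category name off the index
lemma pvChainI_getD (L : List (Bool × String × Int))
    (h : ∀ e ∈ L, PySem.List.pyGetD pvCats e.2.2 "" = e.2.1) :
    PySem.List.pyGetD pvCats (pvChainI L) "" = pvChainC L := by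
  induction L with
  | nil => rfl
  | cons e L ih =>
      obtain ⟨b, c, i⟩ := e
      by_cases hb : b = true
      · simpa [pvChainI, pvChainC, hb] using h (b, c, i) (by simp)
      · simp only [pvChainI, pvChainC, hb, Bool.false_eq_true, if_false]
        exact ih (fun e he => h e (List.mem_cons_of_mem _ he))

lemma pvChainI_mem (S : List Int) (h17 : (17 : Int) ∈ S) :
    ∀ L : List (Bool × String × Int), (∀ e ∈ L, e.2.2 ∈ S) → pvChainI L ∈ S := by
  intro L
  induction L with
  | nil => intro _; exact h17
  | cons e L ih =>
      intro h
      obtain ⟨b, c, i⟩ := e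
      by_cases hb : b = true
      · simpa [pvChainI, hb] using h (b, c, i) (by simp)
      · simp only [pvChainI, hb, Bool.false_eq_true, if_false]
        exact ih (fun e he => h e (List.mem_cons_of_mem _ he))

def pvIdxSet : List Int := [0, 1, 2, 3, 4, 5, 6, 7, 8, 9, 10, 11, 12, 13, 14, 15, 16, 17]

-- the (category name, index) pairs carried by pvConds, as a literal
lemma pvConds_map (op : String) :
    (pvConds op).map (fun e => (e.2.1, e.2.2)) =
      ([("Error", 0), ("Conditional Branch", 7), ("Arithmetic", 1), ("Logical", 2), ("Bitfield", 3),
   ("Move", 4), ("Memory", 5), ("Branch", 6), ("Compare and Branch", 8),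
   ("Conditional Select", 9), ("System", 10), ("Synchronization", 11), ("PAC/Auth", 12),
   ("Address", 13), ("SIMD/FP", 14), ("SVE", 15), ("Crypto", 16)] : List (String × Int)) := rfl

lemma pvRuleIndex_mem (op : String) : pvRuleIndex op ∈ pvIdxSet := by
  rw [pvScan_eq_chainI]
  refine pvChainI_mem pvIdxSet (by decide) _ ?_
  intro e he
  have h2 := List.mem_map_of_mem (f := fun e : Bool × String × Int => (e.2.1, e.2.2)) he
  rw [pvConds_map] at h2
  have hall : ∀ p ∈ ([("Error", 0), ("Conditional Branch", 7), ("Arithmetic", 1), ("Logical", 2), ("Bitfield", 3),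
   ("Move", 4), ("Memory", 5), ("Branch", 6), ("Compare and Branch", 8),
   ("Conditional Select", 9), ("System", 10), ("Synchronization", 11), ("PAC/Auth", 12),
   ("Address", 13), ("SIMD/FP", 14), ("SVE", 15), ("Crypto", 16)] : List (String × Int)), p.2 ∈ pvIdxSet := by decide
  exact hall _ h2

lemma pvClassifyA_eq_getD (op : String) :
    pvClassifyA op = PySem.List.pyGetD pvCats (pvRuleIndex op) "" := by
  rw [pvScan_eq_chainI]
  refine (pvChainI_getD _ ?_).symm
  intro e he
  have h2 := List.mem_map_of_mem (f := fun e : Bool × String × Int => (e.2.1, e.2.2)) he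
  rw [pvConds_map] at h2
  have hall : ∀ p ∈ ([("Error", 0), ("Conditional Branch", 7), ("Arithmetic", 1), ("Logical", 2), ("Bitfield", 3),
   ("Move", 4), ("Memory", 5), ("Branch", 6), ("Compare and Branch", 8),
   ("Conditional Select", 9), ("System", 10), ("Synchronization", 11), ("PAC/Auth", 12),
   ("Address", 13), ("SIMD/FP", 14), ("SVE", 15), ("Crypto", 16)] : List (String × Int)),
      PySem.List.pyGetD pvCats p.2 "" = p.1 := by decide
  exact hall _ h2

-- zip with the mapped labels, filtered on the label, projected back
lemma pvZipFilt (operations : List String) (f : String → Int) (i : Int) :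
    ((operations.zip (operations.map f)).filter (fun q => q.2 == i)).map Prod.fst =
      operations.filter (fun op => f op == i) := by
  induction operations with
  | nil => rfl
  | cons op ops ih =>
      by_cases h : (f op == i) = true <;>
        simp [List.zip_cons_cons, h, ih]

-- one output component: B's index-filtered group equals A's name-filtered group
lemma pvComp (operations : List String) (i : Int) (c : String)
    (h : ∀ j ∈ pvIdxSet, (PySem.List.pyGetD pvCats j "" == c) = (j == i)) :
    ((operations.zip (operations.map pvRuleIndex)).filter (fun q => q.2 == i)).map Prod.fst =
      operations.filter (fun op => pvClassifyA op == c) := by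
  rw [pvZipFilt]
  apply List.filter_congr
  intro op _
  rw [pvClassifyA_eq_getD]
  exact (h _ (pvRuleIndex_mem op)).symm

lemma pvClassifyA_mem (op : String) : pvClassifyA op ∈ pvCats := by
  rw [pvClassifyA_eq_getD]
  have hall : ∀ j ∈ pvIdxSet, PySem.List.pyGetD pvCats j "" ∈ pvCats := by decide
  exact hall _ (pvRuleIndex_mem op)

lemma pvModify_getD (L : List String) (f : String → List String) (k : String)
    (hmem : k ∈ L) :
    (PySem.Dict.mk (L.map fun c => (c, f c))).getD k [] = f k := by
  induction L with
  | nil => cases hmem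
  | cons a L ih =>
      by_cases h : (a == k) = true
      · have : a = k := by simpa using h
        subst this
        simp [PySem.Dict.getD, PySem.Dict.get?]
      · have hk : k ∈ L := by
          rcases List.mem_cons.mp hmem with h' | h'
          · exact absurd (by simp [h']) h
          · exact h'
        simpa [PySem.Dict.getD, PySem.Dict.get?, List.find?_cons, h] using ih hk

lemma pvModify_map (L : List String) (f : String → List String) (k : String)
    (g : List String → List String) (hmem : k ∈ L) :
    (PySem.Dict.mk (L.map fun c => (c, f c))).modify k [] g =
      PySem.Dict.mk (L.map fun c => (c, if c == k then g (f c) else f c)) := by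
  have hc : (PySem.Dict.mk (L.map fun c => (c, f c))).contains k = true := by
    simp only [PySem.Dict.contains, List.any_map, List.any_eq_true]
    exact ⟨k, hmem, by simp⟩
  simp only [PySem.Dict.modify, PySem.Dict.insert, hc, if_pos,
    pvModify_getD L f k hmem]
  congr 1
  simp only [List.map_map]
  apply List.map_congr_left
  intro c _
  by_cases h : (c == k) = true
  · have : c = k := by simpa using h
    subst this
    simp
  · simp only [Function.comp_apply, h, Bool.false_eq_true, if_false]

lemma pvLoop_inv (ops : List String) (f : String → List String) :
    ops.foldl pvStepA (PySem.Dict.mk (pvCats.map fun c => (c, f c))) =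
      PySem.Dict.mk (pvCats.map fun c =>
        (c, f c ++ ops.filter (fun op => pvClassifyA op == c))) := by
  induction ops generalizing f with
  | nil => simp
  | cons op ops ih =>
      rw [List.foldl_cons, pvStepA_eq_modify,
        pvModify_map _ _ _ _ (pvClassifyA_mem op), ih]
      congr 1
      apply List.map_congr_left
      intro c _
      by_cases h : c = pvClassifyA op
      · subst h; simp
      · have h1 : (c == pvClassifyA op) = false := by simp [h]
        have h2 : (pvClassifyA op == c) = false := by simp [Ne.symm h]
        simp [h1, h2]

lemma pvEnum_lit : PySem.List.enumerate pvCats =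
    ([(0, "Error"), (1, "Arithmetic"), (2, "Logical"), (3, "Bitfield"), (4, "Move"), (5, "Memory"),
   (6, "Branch"), (7, "Conditional Branch"), (8, "Compare and Branch"),
   (9, "Conditional Select"), (10, "System"), (11, "Synchronization"), (12, "PAC/Auth"),
   (13, "Address"), (14, "SIMD/FP"), (15, "SVE"), (16, "Crypto"), (17, "Other")] : List (Int × String)) := rfl

-- ===== VERDICT (by name: the statement is the Claim_ definition above) =====
theorem categorize_operations_spec : Claim_equal_categorize_operations := by
  intro operations _
  unfold Spec_categorize_operations categorize_operations categorize_operations_alt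
  dsimp only
  have hinit : (PySem.Dict.ofList
      [("Error", ([] : List String)), ("Arithmetic", []), ("Logical", []), ("Bitfield", []), ("Move", []),
       ("Memory", []), ("Branch", []), ("Conditional Branch", []), ("Compare and Branch", []),
       ("Conditional Select", []), ("System", []), ("Synchronization", []), ("PAC/Auth", []),
       ("Address", []), ("SIMD/FP", []), ("SVE", []), ("Crypto", []), ("Other", [])]) =
      PySem.Dict.mk (pvCats.map fun c => (c, [])) := by decide
  rw [hinit, pvLoop_inv operations (fun _ => [])]
  rw [PySem.List.foldl_append_if
      (p := fun q : Int × String =>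
        !(((operations.zip (operations.map pvRuleIndex)).filter
            (fun q2 => q2.2 == q.1)).map Prod.fst).isEmpty)
      (f := fun q : Int × String =>
        (q.2, ((operations.zip (operations.map pvRuleIndex)).filter
            (fun q2 => q2.2 == q.1)).map Prod.fst))]
  rw [List.nil_append]
  have hB : ((PySem.List.enumerate pvCats).filter
        (fun q : Int × String =>
          !(((operations.zip (operations.map pvRuleIndex)).filter
              (fun q2 => q2.2 == q.1)).map Prod.fst).isEmpty)).map
        (fun q : Int × String =>
          (q.2, ((operations.zip (operations.map pvRuleIndex)).filter
              (fun q2 => q2.2 == q.1)).map Prod.fst)) =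
      ((PySem.List.enumerate pvCats).map
        (fun q : Int × String =>
          (q.2, ((operations.zip (operations.map pvRuleIndex)).filter
              (fun q2 => q2.2 == q.1)).map Prod.fst))).filter
        (fun kv : String × List String => !kv.2.isEmpty) := by
    rw [List.filter_map]
    rfl
  rw [hB]
  have hmap : (pvCats.map fun c =>
        (c, ([] : List String) ++ operations.filter (fun op => pvClassifyA op == c))) =
      (PySem.List.enumerate pvCats).map
        (fun q : Int × String =>
          (q.2, ((operations.zip (operations.map pvRuleIndex)).filter
              (fun q2 => q2.2 == q.1)).map Prod.fst)) := by
    rw [pvEnum_lit]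
    simp only [pvCats, List.map_cons, List.map_nil, List.nil_append]
    rw [pvComp operations 0 "Error" (by decide)]
    rw [pvComp operations 1 "Arithmetic" (by decide)]
    rw [pvComp operations 2 "Logical" (by decide)]
    rw [pvComp operations 3 "Bitfield" (by decide)]
    rw [pvComp operations 4 "Move" (by decide)]
    rw [pvComp operations 5 "Memory" (by decide)]
    rw [pvComp operations 6 "Branch" (by decide)]
    rw [pvComp operations 7 "Conditional Branch" (by decide)]
    rw [pvComp operations 8 "Compare and Branch" (by decide)]
    rw [pvComp operations 9 "Conditional Select" (by decide)]
    rw [pvComp operations 10 "System" (by decide)]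
    rw [pvComp operations 11 "Synchronization" (by decide)]
    rw [pvComp operations 12 "PAC/Auth" (by decide)]
    rw [pvComp operations 13 "Address" (by decide)]
    rw [pvComp operations 14 "SIMD/FP" (by decide)]
    rw [pvComp operations 15 "SVE" (by decide)]
    rw [pvComp operations 16 "Crypto" (by decide)]
    rw [pvComp operations 17 "Other" (by decide)]
  rw [hmap]
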